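-- pv_equiv track=rewrite | github.com/vm-sudharsan/Inventory-Management-System | Desktop/python/sandwich vowel.py | updateSandwichedVowels
-- ===== SOURCE A (Python) =====
-- def isVowel(x):
--     if (x == 'a' or x == 'e' or x == 'i' or
--                     x == 'o' or x == 'u'):
--         return True
--     else:
--         return False
--
-- def updateSandwichedVowels(a):
--     n = len(a)
--     updatedString = ""
--     for i in range(0, n, 1):
--       if (i == 0 or i == n - 1):
--         updatedString += a[i]
--         continue
--       if (isVowel(a[i]) == True and
--             isVowel(a[i - 1]) == False and
--             isVowel(a[i + 1]) == False):
--             continue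
--       updatedString += a[i]
--     return updatedString
-- ===== SOURCE B (Python) =====
-- def updateSandwichedVowels(a):
--     VOW = 'aeiou'
--     # stage 1: split the string into maximal runs of vowels / non-vowels
--     runs = []
--     i = 0
--     while i < len(a):
--         j = i + 1
--         while j < len(a) and (a[j] in VOW) == (a[i] in VOW):
--             j += 1
--         runs.append(a[i:j])
--         i = j
--     # stage 2: a sandwiched vowel is exactly a length-1 vowel run that is
--     # neither the first nor the last run (its neighbours are non-vowel runs)
--     kept = [r for j, r in enumerate(runs)
--             if not (len(r) == 1 and r in VOW and 0 < j < len(runs) - 1)]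
--     return ''.join(kept)
-- ===== Notes on version B (the rewrite author's own statement) =====
-- stated objective: alternative
-- what changed: Replaced A's single indexed pass with per-character neighbour tests by a two-stage run-length algorithm: split the string into maximal vowel/non-vowel runs, then drop exactly the length-1 vowel runs that are neither the first nor the last run.
import Mathlib
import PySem

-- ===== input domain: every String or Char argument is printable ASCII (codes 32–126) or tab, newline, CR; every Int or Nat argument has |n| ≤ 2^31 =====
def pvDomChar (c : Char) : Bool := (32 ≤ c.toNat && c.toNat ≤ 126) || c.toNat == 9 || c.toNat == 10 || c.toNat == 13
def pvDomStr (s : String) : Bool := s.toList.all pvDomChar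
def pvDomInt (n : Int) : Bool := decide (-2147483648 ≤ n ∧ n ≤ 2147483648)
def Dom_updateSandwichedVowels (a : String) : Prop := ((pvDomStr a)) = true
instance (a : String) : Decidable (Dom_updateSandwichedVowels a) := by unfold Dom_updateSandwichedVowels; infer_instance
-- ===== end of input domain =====

-- B replaces A's indexed pass with per-character neighbour tests by a two-stage
-- run-length algorithm: split into maximal vowel/non-vowel runs, then drop exactly
-- the length-1 vowel runs that are neither the first nor the last run; same O(n) cost.

-- ===== PORT A =====
def pvIsVowel (x : Char) : Bool :=
  if (x = 'a' ∨ x = 'e' ∨ x = 'i' ∨ x = 'o' ∨ x = 'u') then true else false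

-- the for-loop over range(0, n, 1); every index accessed is in range, so getD's
-- default ' ' is never used (faithful to Python, which never raises here)
def pvLoopA (l : List Char) (n : Nat) : List Nat → List Char → List Char
  | [], acc => acc
  | i :: is, acc =>
    if i = 0 ∨ i = n - 1 then pvLoopA l n is (acc ++ [l.getD i ' '])
    else if pvIsVowel (l.getD i ' ') = true ∧ pvIsVowel (l.getD (i - 1) ' ') = false ∧
            pvIsVowel (l.getD (i + 1) ' ') = false then
      pvLoopA l n is acc
    else pvLoopA l n is (acc ++ [l.getD i ' '])

def updateSandwichedVowels (a : String) : String :=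
  String.ofList (pvLoopA a.toList a.toList.length (List.range a.toList.length) [])

-- ===== PORT B =====
def pvVowels : List Char := ['a', 'e', 'i', 'o', 'u']

-- stage 1: the outer while loop, as recursion on the remaining suffix a[i:]; the inner
-- while loop takes the maximal prefix after a[i] whose vowelness agrees with a[i]
-- (= takeWhile), and i = j resumes after it (= dropWhile)
def pvRunsB : List Char → List (List Char)
  | [] => []
  | c :: cs =>
    (c :: cs.takeWhile (fun d => pvVowels.contains d == pvVowels.contains c)) ::
      pvRunsB (cs.dropWhile (fun d => pvVowels.contains d == pvVowels.contains c))
  termination_by l => l.length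
  decreasing_by
    exact Nat.lt_succ_of_le (List.length_dropWhile_le _ _)

-- stage 2: the comprehension over enumerate(runs); 'r in VOW' is only reached when
-- len(r) == 1, where it is membership of the single character
def updateSandwichedVowels_alt (a : String) : String :=
  let rs := pvRunsB a.toList
  String.ofList ((((PySem.List.enumerate rs).filter (fun jr =>
      !(jr.2.length == 1 && pvVowels.contains (jr.2.headD ' ') &&
        (decide (0 < jr.1) && decide (jr.1 < (rs.length : Int) - 1))))).map (·.2)).flatten)

-- ===== PRECONDITION & SPEC =====
def Spec_updateSandwichedVowels (a : String) (out : String) : Prop := out = updateSandwichedVowels_alt a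
instance (a : String) (out : String) : Decidable (Spec_updateSandwichedVowels a out) := by unfold Spec_updateSandwichedVowels; infer_instance

-- ===== CLAIM (what is proved, stated in full; the proofs are below) =====
def Claim_equal_updateSandwichedVowels : Prop := ∀ (a : String), Dom_updateSandwichedVowels a → Spec_updateSandwichedVowels a (updateSandwichedVowels a)

-- ===== LEMMAS AND PROOFS =====

-- ---- A side: characterise A's loop as a neighbour-aware recursion pvGo ----

-- the per-index contribution of A's loop
def pvStepA (l : List Char) (n : Nat) (i : Nat) : Option Char :=
  if i = 0 ∨ i = n - 1 then some (l.getD i ' ')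
  else if pvIsVowel (l.getD i ' ') = true ∧ pvIsVowel (l.getD (i - 1) ' ') = false ∧
          pvIsVowel (l.getD (i + 1) ' ') = false then none
  else some (l.getD i ' ')

theorem pvLoopA_eq (l : List Char) (n : Nat) :
    ∀ (is : List Nat) (acc : List Char),
      pvLoopA l n is acc = acc ++ is.filterMap (pvStepA l n) := by
  intro is
  induction is with
  | nil => intro acc; simp [pvLoopA]
  | cons i is ih =>
    intro acc
    by_cases h1 : i = 0 ∨ i = n - 1
    · rw [List.filterMap_cons_some (show pvStepA l n i = some (l.getD i ' ') by
        unfold pvStepA; rw [if_pos h1])]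
      unfold pvLoopA
      rw [if_pos h1, ih]
      simp
    · by_cases h2 : pvIsVowel (l.getD i ' ') = true ∧ pvIsVowel (l.getD (i - 1) ' ') = false ∧
          pvIsVowel (l.getD (i + 1) ' ') = false
      · rw [List.filterMap_cons_none (show pvStepA l n i = none by
          unfold pvStepA; rw [if_neg h1, if_pos h2])]
        unfold pvLoopA
        rw [if_neg h1, if_pos h2, ih]
      · rw [List.filterMap_cons_some (show pvStepA l n i = some (l.getD i ' ') by
          unfold pvStepA; rw [if_neg h1, if_neg h2])]
        unfold pvLoopA
        rw [if_neg h1, if_neg h2, ih]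
        simp

-- kept interior characters after previous char p (final char always kept)
def pvGo : Char → List Char → List Char
  | _, [] => []
  | _, [c] => [c]
  | p, c :: d :: rest =>
    (if pvIsVowel c = true ∧ pvIsVowel p = false ∧ pvIsVowel d = false then [] else [c]) ++
      pvGo c (d :: rest)

theorem pvRange'_go (l : List Char) :
    ∀ (m k : Nat), 1 ≤ k → k + m = l.length →
      (List.range' k m).filterMap (pvStepA l l.length) = pvGo (l.getD (k - 1) ' ') (l.drop k) := by
  intro m
  induction m with
  | zero =>
    intro k _ hk
    simp at hk
    simp [hk, List.drop_length, pvGo]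
  | succ m ih =>
    intro k hk1 hkm
    have hkn : k < l.length := by omega
    have hdrop : l.drop k = l[k] :: l.drop (k + 1) := List.drop_eq_getElem_cons hkn
    have hgetk : l.getD k ' ' = l[k] := List.getD_eq_getElem l ' ' hkn
    rw [List.range'_succ]
    cases m with
    | zero =>
      have hlast : k = l.length - 1 := by omega
      rw [List.filterMap_cons_some (show pvStepA l l.length k = some (l.getD k ' ') by
        unfold pvStepA; rw [if_pos (Or.inr hlast)])]
      have hdropk1 : l.drop (k + 1) = [] := List.drop_eq_nil_of_le (by omega)
      rw [hdrop, hdropk1, hgetk]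
      simp [pvGo]
    | succ m' =>
      have hno : ¬ (k = 0 ∨ k = l.length - 1) := by
        simp only [not_or]; exact ⟨by omega, by omega⟩
      have hk1n : k + 1 < l.length := by omega
      have hdrop1 : l.drop (k + 1) = l[k + 1] :: l.drop (k + 2) := List.drop_eq_getElem_cons hk1n
      have hgetk1 : l.getD (k + 1) ' ' = l[k + 1] := List.getD_eq_getElem l ' ' hk1n
      have hih := ih (k + 1) (by omega) (by omega)
      simp only [Nat.add_sub_cancel] at hih
      rw [hgetk, hdrop1] at hih
      by_cases hc : pvIsVowel l[k] = true ∧ pvIsVowel (l.getD (k - 1) ' ') = false ∧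
          pvIsVowel l[k + 1] = false
      · rw [List.filterMap_cons_none (show pvStepA l l.length k = none by
          unfold pvStepA; rw [if_neg hno, hgetk, hgetk1, if_pos hc])]
        rw [hih, hdrop, hdrop1]
        simp only [pvGo]
        rw [if_pos hc]
        simp
      · rw [List.filterMap_cons_some (show pvStepA l l.length k = some (l.getD k ' ') by
          unfold pvStepA; rw [if_neg hno]
          rw [show (if pvIsVowel (l.getD k ' ') = true ∧ pvIsVowel (l.getD (k - 1) ' ') = false ∧
              pvIsVowel (l.getD (k + 1) ' ') = false then (none : Option Char)
            else some (l.getD k ' ')) = some (l.getD k ' ') by rw [hgetk, hgetk1, if_neg hc]])]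
        rw [hih, hdrop, hdrop1, hgetk]
        simp only [pvGo]
        rw [if_neg hc]
        simp

theorem pvA_chars (c : Char) (rest : List Char) :
    pvLoopA (c :: rest) (c :: rest).length (List.range (c :: rest).length) [] =
      c :: pvGo c rest := by
  rw [pvLoopA_eq]
  have h1 : List.range (c :: rest).length = 0 :: List.range' 1 rest.length := by
    rw [show (c :: rest).length = rest.length + 1 from rfl, List.range_eq_range']
    exact List.range'_succ
  rw [h1, List.filterMap_cons_some (show pvStepA (c :: rest) (c :: rest).length 0 = some c by
    unfold pvStepA; rw [if_pos (Or.inl rfl)]; rfl)]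
  cases rest with
  | nil => simp [pvGo]
  | cons d rs =>
    have h2 := pvRange'_go (c :: d :: rs) (d :: rs).length 1 (by omega) (by simp; omega)
    simp only [Nat.sub_self] at h2
    simpa using h2

-- ---- B side: characterise the run-based construction ----

theorem pvVowel_contains (x : Char) : pvVowels.contains x = pvIsVowel x := by
  simp only [pvVowels, pvIsVowel, List.contains_cons, List.contains_nil, Bool.or_false]
  by_cases h : x = 'a' ∨ x = 'e' ∨ x = 'i' ∨ x = 'o' ∨ x = 'u'
  · rw [if_pos h]
    rcases h with h | h | h | h | h <;> simp [h]
  · rw [if_neg h]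
    simp only [not_or] at h
    obtain ⟨h1, h2, h3, h4, h5⟩ := h
    simp [h1, h2, h3, h4, h5]

-- what survives of the runs after the first one: a single-vowel run is dropped unless last
def pvDS : List (List Char) → List Char
  | [] => []
  | [r] => r
  | r :: s :: t =>
    (if r.length = 1 ∧ pvIsVowel (r.headD ' ') = true then [] else r) ++ pvDS (s :: t)

-- pvGo walks transparently through a block of non-vowels
theorem pvGo_nonvowel_block (ns : List Char) :
    ∀ (p : Char) (tail : List Char), (∀ x ∈ ns, pvIsVowel x = false) →
      pvGo p (ns ++ tail) = ns ++ pvGo (ns.getLastD p) tail := by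
  induction ns with
  | nil => intro p tail _; simp
  | cons c ns' ih =>
    intro p tail h
    have hc : pvIsVowel c = false := h c (by simp)
    have hrest : ∀ x ∈ ns', pvIsVowel x = false := fun x hx => h x (by simp [hx])
    rw [List.getLastD_cons]
    cases hns : ns' ++ tail with
    | nil =>
      have hns' : ns' = [] := by cases ns' <;> simp_all
      have htail : tail = [] := by cases tail <;> simp_all
      simp [hns', htail, pvGo]
    | cons x rest' =>
      rw [show (c :: ns') ++ tail = c :: (ns' ++ tail) from rfl]
      rw [show pvGo p (c :: (ns' ++ tail)) = [c] ++ pvGo c (ns' ++ tail) by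
        rw [hns]; simp [pvGo, hc]]
      rw [ih c tail hrest]
      simp

-- pvGo keeps a block of vowels entirely when the previous char is a vowel
theorem pvGo_vowel_block (vs : List Char) :
    ∀ (p : Char) (tail : List Char), (∀ x ∈ vs, pvIsVowel x = true) → pvIsVowel p = true →
      pvGo p (vs ++ tail) = vs ++ pvGo (vs.getLastD p) tail := by
  induction vs with
  | nil => intro p tail _ _; simp
  | cons c vs' ih =>
    intro p tail h hp
    have hc : pvIsVowel c = true := h c (by simp)
    have hrest : ∀ x ∈ vs', pvIsVowel x = true := fun x hx => h x (by simp [hx])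
    rw [List.getLastD_cons]
    cases hns : vs' ++ tail with
    | nil =>
      have hns' : vs' = [] := by cases vs' <;> simp_all
      have htail : tail = [] := by cases tail <;> simp_all
      simp [hns', htail, pvGo]
    | cons x rest' =>
      rw [show (c :: vs') ++ tail = c :: (vs' ++ tail) from rfl]
      rw [show pvGo p (c :: (vs' ++ tail)) = [c] ++ pvGo c (vs' ++ tail) by
        rw [hns]; simp [pvGo, hp]]
      rw [ih c tail hrest hc]
      simp

theorem pvGo_through_run (c p : Char) (tw dw : List Char)
    (htw : ∀ x ∈ tw, pvIsVowel x = pvIsVowel c) (hcp : pvIsVowel c = pvIsVowel p) :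
    pvGo p (tw ++ dw) = tw ++ pvGo (tw.getLastD p) dw := by
  cases hv : pvIsVowel c with
  | false =>
    exact pvGo_nonvowel_block tw p dw (fun x hx => by rw [htw x hx, hv])
  | true =>
    exact pvGo_vowel_block tw p dw (fun x hx => by rw [htw x hx, hv]) (by rw [← hcp, hv])

theorem pvTakeWhile_uniform (cs : List Char) (c : Char) :
    ∀ x ∈ cs.takeWhile (fun d => pvVowels.contains d == pvVowels.contains c),
      pvIsVowel x = pvIsVowel c := by
  intro x hx
  have h2 : pvVowels.contains x = pvVowels.contains c := by
    simpa using List.mem_takeWhile_imp hx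
  rw [pvVowel_contains, pvVowel_contains] at h2
  exact h2

theorem pvDropWhile_head (cs : List Char) (c : Char) :
    ∀ d ds, cs.dropWhile (fun d => pvVowels.contains d == pvVowels.contains c) = d :: ds →
      pvIsVowel d ≠ pvIsVowel c := by
  intro d ds hd
  have h2 := List.head?_dropWhile_not (fun d => pvVowels.contains d == pvVowels.contains c) cs
  rw [hd] at h2
  simp only [List.head?_cons] at h2
  have h3 : (pvVowels.contains d == pvVowels.contains c) = false := h2
  rw [pvVowel_contains, pvVowel_contains] at h3
  simpa using h3

theorem pvGetLastD_uniform (tw : List Char) :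
    ∀ (c : Char), (∀ x ∈ tw, pvIsVowel x = pvIsVowel c) →
      pvIsVowel (tw.getLastD c) = pvIsVowel c := by
  induction tw with
  | nil => intro c _; rfl
  | cons x tw' ih =>
    intro c h
    have hx : pvIsVowel x = pvIsVowel c := h x (by simp)
    rw [List.getLastD_cons, ih x (fun y hy => by rw [h y (by simp [hy]), hx]), hx]

theorem pvDS_cons_keep (r : List Char) (rs : List (List Char))
    (h : ¬(r.length = 1 ∧ pvIsVowel (r.headD ' ') = true)) :
    pvDS (r :: rs) = r ++ pvDS rs := by
  cases rs with
  | nil => simp [pvDS]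
  | cons s t =>
    rw [show pvDS (r :: s :: t) =
        (if r.length = 1 ∧ pvIsVowel (r.headD ' ') = true then [] else r) ++ pvDS (s :: t)
      from rfl, if_neg h]

-- main bridge: pvGo after a char of opposite vowelness equals the run filter
theorem pvGo_runs (l : List Char) :
    ∀ (p : Char), (∀ c cs, l = c :: cs → pvIsVowel c ≠ pvIsVowel p) →
      pvGo p l = pvDS (pvRunsB l) := by
  induction l using pvRunsB.induct with
  | case1 => intro p _; simp [pvGo, pvRunsB, pvDS]
  | case2 c cs ih =>
    intro p hp
    have hcp : pvIsVowel c ≠ pvIsVowel p := hp c cs rfl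
    rw [pvRunsB]
    cases cs with
    | nil => simp [pvGo, pvRunsB, pvDS]
    | cons d cs' =>
      have htw := pvTakeWhile_uniform (d :: cs') c
      have hdw := pvDropWhile_head (d :: cs') c
      by_cases hpd : (pvVowels.contains d == pvVowels.contains c) = true
      · -- d continues c's run
        have ht : List.takeWhile (fun e => pvVowels.contains e == pvVowels.contains c) (d :: cs') =
            d :: List.takeWhile (fun e => pvVowels.contains e == pvVowels.contains c) cs' := by
          rw [List.takeWhile_cons, if_pos hpd]
        have hdr : List.dropWhile (fun e => pvVowels.contains e == pvVowels.contains c) (d :: cs') =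
            List.dropWhile (fun e => pvVowels.contains e == pvVowels.contains c) cs' := by
          rw [List.dropWhile_cons, if_pos hpd]
        simp only [ht, hdr] at htw hdw ih ⊢
        have hvd : pvIsVowel d = pvIsVowel c := by
          have h3 : pvVowels.contains d = pvVowels.contains c := eq_of_beq hpd
          rw [pvVowel_contains, pvVowel_contains] at h3
          exact h3
        have htw' : ∀ x ∈ cs'.takeWhile (fun e => pvVowels.contains e == pvVowels.contains c),
            pvIsVowel x = pvIsVowel c := fun x hx => htw x (List.mem_cons_of_mem d hx)
        have hq : pvIsVowel ((cs'.takeWhile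
            (fun e => pvVowels.contains e == pvVowels.contains c)).getLastD d) = pvIsVowel c := by
          rw [pvGetLastD_uniform _ d (fun x hx => by rw [htw' x hx, hvd]), hvd]
        have hsplit : cs' = cs'.takeWhile (fun e => pvVowels.contains e == pvVowels.contains c) ++
            cs'.dropWhile (fun e => pvVowels.contains e == pvVowels.contains c) :=
          (List.takeWhile_append_dropWhile).symm
        have hih := ih ((cs'.takeWhile
            (fun e => pvVowels.contains e == pvVowels.contains c)).getLastD d)
          (fun c' cs'' hc' => by rw [hq]; exact hdw c' cs'' hc')
        cases hv : pvIsVowel c with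
        | false =>
          have hstep := pvGo_nonvowel_block
            (c :: d :: cs'.takeWhile (fun e => pvVowels.contains e == pvVowels.contains c)) p
            (cs'.dropWhile (fun e => pvVowels.contains e == pvVowels.contains c))
            (by
              intro x hx
              rcases List.mem_cons.mp hx with h1 | hx2
              · rw [h1, hv]
              · rcases List.mem_cons.mp hx2 with h1 | hx3
                · rw [h1, hvd, hv]
                · rw [htw' x hx3, hv])
          rw [show c :: d :: cs' =
              (c :: d :: cs'.takeWhile (fun e => pvVowels.contains e == pvVowels.contains c)) ++
                cs'.dropWhile (fun e => pvVowels.contains e == pvVowels.contains c) by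
            simp]
          rw [hstep]
          rw [List.getLastD_cons, List.getLastD_cons, hih]
          rw [pvDS_cons_keep _ _ (by intro hcon; simp [hv] at hcon)]
        | true =>
          -- keep c (its right neighbour d is a vowel), then walk through the vowel block
          have hpeel : pvGo p (c :: d :: cs') = [c] ++ pvGo c (d :: cs') := by
            rw [show pvGo p (c :: d :: cs') =
                (if pvIsVowel c = true ∧ pvIsVowel p = false ∧ pvIsVowel d = false then []
                  else [c]) ++ pvGo c (d :: cs') from rfl]
            rw [if_neg (fun hcon => by simp [hvd, hv] at hcon)]
          rw [hpeel]
          rw [show d :: cs' =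
              (d :: cs'.takeWhile (fun e => pvVowels.contains e == pvVowels.contains c)) ++
                cs'.dropWhile (fun e => pvVowels.contains e == pvVowels.contains c) by
            simp]
          rw [pvGo_vowel_block
            (d :: cs'.takeWhile (fun e => pvVowels.contains e == pvVowels.contains c)) c
            (cs'.dropWhile (fun e => pvVowels.contains e == pvVowels.contains c))
            (by
              intro x hx
              rcases List.mem_cons.mp hx with h1 | hx2
              · rw [h1, hvd, hv]
              · rw [htw' x hx2, hv])
            hv]
          rw [List.getLastD_cons, hih]
          rw [pvDS_cons_keep _ _ (by intro hcon; simp at hcon)]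
          simp
      · -- c's run is just [c]
        have hpdf : (pvVowels.contains d == pvVowels.contains c) = false := by simpa using hpd
        have ht : List.takeWhile (fun e => pvVowels.contains e == pvVowels.contains c) (d :: cs') =
            [] := by rw [List.takeWhile_cons, if_neg hpd]
        have hdr : List.dropWhile (fun e => pvVowels.contains e == pvVowels.contains c) (d :: cs') =
            d :: cs' := by rw [List.dropWhile_cons, if_neg hpd]
        simp only [ht, hdr] at htw hdw ih ⊢
        have hvd : pvIsVowel d ≠ pvIsVowel c := hdw d cs' rfl
        have hih := ih c (fun c' cs'' hc' => by
          injection hc' with h1 _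
          rw [h1] at hvd
          exact hvd)
        cases hv : pvIsVowel c with
        | false =>
          have hstep := pvGo_nonvowel_block [c] p (d :: cs') (by
            intro x hx
            rw [List.mem_singleton.mp hx, hv])
          rw [show c :: d :: cs' = [c] ++ (d :: cs') from rfl, hstep]
          rw [show (([c] : List Char).getLastD p) = c from rfl, hih]
          rw [pvDS_cons_keep _ _ (by intro hcon; simp [hv] at hcon)]
        | true =>
          -- c is a sandwiched vowel: p and d are non-vowels, A drops it and B's pvDS drops [c]
          have hvp : pvIsVowel p = false := by
            rw [hv] at hcp
            exact Bool.eq_false_iff.mpr (fun h => hcp h.symm)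
          have hvdf : pvIsVowel d = false := by
            rw [hv] at hvd
            exact Bool.eq_false_iff.mpr hvd
          have hdrop : pvGo p (c :: d :: cs') = pvGo c (d :: cs') := by
            simp only [pvGo]
            rw [if_pos ⟨hv, hvp, hvdf⟩]
            simp
          rw [hdrop, hih, pvRunsB]
          simp [pvDS, hv]

-- the enumerate/filter comprehension, after the first run, is pvDS
theorem pvEnum_tail (rs' : List (List Char)) :
    ∀ (s : Int) (n : Nat), 1 ≤ s → s + rs'.length = (n : Int) →
      ((((PySem.List.enumerate rs' s).filter (fun jr =>
          !(jr.2.length == 1 && pvVowels.contains (jr.2.headD ' ') &&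
            (decide (0 < jr.1) && decide (jr.1 < (n : Int) - 1))))).map (·.2)).flatten : List Char)
        = pvDS rs' := by
  induction rs' with
  | nil => intro s n _ _; simp [PySem.List.enumerate_nil, pvDS]
  | cons r rest ih =>
    intro s n hs hlen
    rw [PySem.List.enumerate_cons, List.filter_cons]
    cases rest with
    | nil =>
      have hsn : s = (n : Int) - 1 := by simp at hlen; omega
      have hlt : decide (s < (n : Int) - 1) = false := by simp [hsn]
      simp [PySem.List.enumerate_nil, hlt, pvDS]
    | cons r2 rest2 =>
      have h0 : decide ((0 : Int) < s) = true := by simp; omega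
      have h1 : decide (s < (n : Int) - 1) = true := by
        simp only [List.length_cons] at hlen
        simp
        omega
      have htail := ih (s + 1) n (by omega) (by
        simp only [List.length_cons] at hlen ⊢
        push_cast at hlen ⊢
        omega)
      by_cases hb : (r.length == 1 && pvVowels.contains (r.headD ' ')) = true
      · have hcond : (!(r.length == 1 && pvVowels.contains (r.headD ' ') &&
            (decide ((0:Int) < s) && decide (s < (n : Int) - 1)))) = false := by
          rw [hb, h0, h1]; rfl
        rw [hcond]
        simp only [Bool.false_eq_true, if_false]
        rw [htail]
        have hb' : r.length = 1 ∧ pvIsVowel (r.headD ' ') = true := by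
          have := Bool.and_eq_true_iff.mp hb
          exact ⟨by simpa using this.1, by rw [← pvVowel_contains]; exact this.2⟩
        rw [show pvDS (r :: r2 :: rest2) =
            (if r.length = 1 ∧ pvIsVowel (r.headD ' ') = true then [] else r) ++
              pvDS (r2 :: rest2) from rfl]
        rw [if_pos hb']
        rfl
      · have hcond : (!(r.length == 1 && pvVowels.contains (r.headD ' ') &&
            (decide ((0:Int) < s) && decide (s < (n : Int) - 1)))) = true := by
          rw [Bool.eq_false_iff.mpr hb]; rfl
        rw [hcond]
        simp only [if_true]
        rw [List.map_cons, List.flatten_cons, htail]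
        have hb' : ¬(r.length = 1 ∧ pvIsVowel (r.headD ' ') = true) := by
          intro hcon
          apply hb
          rw [Bool.and_eq_true_iff]
          exact ⟨by simp [hcon.1], by rw [pvVowel_contains]; exact hcon.2⟩
        rw [show pvDS (r :: r2 :: rest2) =
            (if r.length = 1 ∧ pvIsVowel (r.headD ' ') = true then [] else r) ++
              pvDS (r2 :: rest2) from rfl]
        rw [if_neg hb']

theorem pvB_chars (rs : List (List Char)) :
    ((((PySem.List.enumerate rs).filter (fun jr =>
        !(jr.2.length == 1 && pvVowels.contains (jr.2.headD ' ') &&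
          (decide (0 < jr.1) && decide (jr.1 < (rs.length : Int) - 1))))).map (·.2)).flatten : List Char)
      = (match rs with | [] => [] | r :: rs' => r ++ pvDS rs') := by
  cases rs with
  | nil => simp [PySem.List.enumerate_nil]
  | cons r rs' =>
    rw [PySem.List.enumerate_cons, List.filter_cons]
    have hcond : (!(r.length == 1 && pvVowels.contains (r.headD ' ') &&
        (decide ((0:Int) < 0) && decide ((0:Int) < ((r :: rs').length : Int) - 1)))) = true := by
      simp
    rw [hcond]
    simp only [if_true]
    rw [List.map_cons, List.flatten_cons]
    rw [pvEnum_tail rs' (0 + 1) (r :: rs').length (by omega) (by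
      simp only [List.length_cons]
      push_cast
      omega)]

-- ===== VERDICT (by name: the statement is the Claim_ definition above) =====
theorem updateSandwichedVowels_spec : Claim_equal_updateSandwichedVowels := by
  intro a _
  unfold Spec_updateSandwichedVowels
  simp only [updateSandwichedVowels, updateSandwichedVowels_alt]
  rw [pvB_chars]
  cases h : a.toList with
  | nil =>
    rw [show pvRunsB ([] : List Char) = [] by rw [pvRunsB]]
    rfl
  | cons c rest =>
    rw [pvA_chars, pvRunsB]
    have htw := pvTakeWhile_uniform rest c
    have hdw := pvDropWhile_head rest c
    have hsplit : rest = rest.takeWhile (fun e => pvVowels.contains e == pvVowels.contains c) ++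
        rest.dropWhile (fun e => pvVowels.contains e == pvVowels.contains c) :=
      (List.takeWhile_append_dropWhile).symm
    have hq : pvIsVowel ((rest.takeWhile
        (fun e => pvVowels.contains e == pvVowels.contains c)).getLastD c) = pvIsVowel c :=
      pvGetLastD_uniform _ c htw
    have hgo : pvGo c rest =
        rest.takeWhile (fun e => pvVowels.contains e == pvVowels.contains c) ++
          pvGo ((rest.takeWhile (fun e => pvVowels.contains e == pvVowels.contains c)).getLastD c)
            (rest.dropWhile (fun e => pvVowels.contains e == pvVowels.contains c)) := by
      conv_lhs => rw [hsplit]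
      exact pvGo_through_run c c _ _ htw rfl
    rw [hgo]
    rw [pvGo_runs _ _ (fun c' cs' hc' => by rw [hq]; exact hdw c' cs' hc')]
    rfl
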